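-- pv_equiv track=rewrite | github.com/nainai23012/chengqingdan_v2 | 诚清单2.0_test_16（源代码文件）/myMainWindow.py | transpose_2d
-- ===== SOURCE A (Python) =====
-- def transpose_2d(data):
--     transposed = []
--     cols = len(data)
--     # 判断行数
--     rows = 0
--     for col in range(cols):
--         temprows = len(data[col])
--         if temprows > rows:
--             rows = temprows
--     # rows = len(data[0])
--     for row in range(rows):
--         list2 = []
--         for col in range(cols):
--             try:
--                 itemstr = data[col][row]
--             except:
--                 itemstr = ''
--             list2.append(itemstr)
--         transposed.append(list2)
--     return transposed
-- ===== SOURCE B (Python) =====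
-- def transpose_2d(data):
--     transposed = []
--     cur = list(data)
--     while any(cur):
--         transposed.append([r[0] if r else '' for r in cur])
--         cur = [r[1:] for r in cur]
--     return transposed
-- ===== Notes on version B (the rewrite author's own statement) =====
-- stated objective: simpler
-- what changed: Replaces the two-phase max-row-count scan plus try/except-guarded double indexing with a single lockstep traversal that repeatedly peels the heads of all rows (padding exhausted rows with '') until every row is empty.
import Mathlib
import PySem

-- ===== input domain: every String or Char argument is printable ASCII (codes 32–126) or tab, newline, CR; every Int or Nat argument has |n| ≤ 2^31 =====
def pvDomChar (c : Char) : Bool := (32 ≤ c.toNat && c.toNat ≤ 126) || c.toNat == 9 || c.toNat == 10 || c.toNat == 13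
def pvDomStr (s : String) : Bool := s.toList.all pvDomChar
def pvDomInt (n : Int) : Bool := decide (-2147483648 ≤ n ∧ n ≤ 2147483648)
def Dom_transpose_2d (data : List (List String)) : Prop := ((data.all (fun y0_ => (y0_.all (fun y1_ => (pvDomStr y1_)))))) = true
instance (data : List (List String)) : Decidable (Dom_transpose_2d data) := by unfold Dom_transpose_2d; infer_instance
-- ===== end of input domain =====

-- B replaces A's max-row-count scan plus try/except-guarded indexing by a lockstep
-- head-peeling traversal (simpler decomposition, same asymptotic cost).

-- ===== PORT A =====
def transpose_2d (data : List (List String)) : List (List String) :=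
  let cols : Int := data.length
  -- 'for col in range(cols): temprows = len(data[col]); if temprows > rows: rows = temprows'
  let rows : Int := (PySem.List.pyRange 0 cols).foldl
    (fun rows col =>
      let temprows : Int := (PySem.List.pyGetD data col []).length
      if rows < temprows then temprows else rows) 0
  -- 'for row in range(rows): … for col in range(cols): try data[col][row] except '''
  (PySem.List.pyRange 0 rows).foldl
    (fun transposed row =>
      let list2 := (PySem.List.pyRange 0 cols).foldl
        (fun list2 col =>
          -- try/except around data[col][row]: out-of-range row gives '' (col is always in range)
          let itemstr := (PySem.List.pyGet? (PySem.List.pyGetD data col []) row).getD ""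
          list2 ++ [itemstr]) []
      transposed ++ [list2]) []

-- ===== PORT B =====
-- sum of row lengths, strictly decreasing while some row is nonempty (termination measure)
def pvSumLen (cur : List (List String)) : Nat := (cur.map List.length).sum

theorem pvSumLen_tail_lt (cur : List (List String)) (h : cur.any (fun r => !r.isEmpty) = true) :
    pvSumLen (cur.map List.tail) < pvSumLen cur := by
  induction cur with
  | nil => simp at h
  | cons r rest ih =>
    simp only [List.any_cons, Bool.or_eq_true] at h
    simp only [List.map_cons, pvSumLen, List.sum_cons]
    rcases h with h | h
    · have h1 : r.tail.length < r.length := by cases r <;> simp_all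
      have hle : ((rest.map List.tail).map List.length).sum ≤ (rest.map List.length).sum := by
        simp only [List.map_map]
        exact List.sum_le_sum (by intro x hx; simp [List.length_tail])
      omega
    · have h1 := ih h
      simp only [pvSumLen] at h1
      have h2 : r.tail.length ≤ r.length := by simp [List.length_tail]
      omega

-- 'while any(cur): transposed.append([r[0] if r else '' for r in cur]); cur = [r[1:] for r in cur]'
def pvGo (cur : List (List String)) : List (List String) :=
  if h : cur.any (fun r => !r.isEmpty) = true then
    (cur.map (fun r => r.headD "")) :: pvGo (cur.map List.tail)
  else []
termination_by pvSumLen cur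
decreasing_by simpa using pvSumLen_tail_lt cur h

def transpose_2d_alt (data : List (List String)) : List (List String) := pvGo data

-- ===== PRECONDITION & SPEC =====
def Spec_transpose_2d (data : List (List String)) (out : List (List String)) : Prop := out = transpose_2d_alt data
instance (data : List (List String)) (out : List (List String)) : Decidable (Spec_transpose_2d data out) := by unfold Spec_transpose_2d; infer_instance

-- ===== CLAIM (what is proved, stated in full; the proofs are below) =====
def Claim_equal_transpose_2d : Prop := ∀ (data : List (List String)), Dom_transpose_2d data → Spec_transpose_2d data (transpose_2d data)

-- ===== LEMMAS AND PROOFS =====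

-- common characterisation: the transpose has max-row-length rows, row i is data.map (fun r => r.getD i "")
def pvMaxLen (data : List (List String)) : Nat := data.foldl (fun m r => max m r.length) 0

def pvTr (data : List (List String)) (m : Nat) : List (List String) :=
  (List.range m).map (fun i => data.map (fun r => r.getD i ""))

theorem pvMaxLen_foldl (data : List (List String)) (a : Nat) :
    data.foldl (fun m r => max m r.length) a = max a (pvMaxLen data) := by
  induction data generalizing a with
  | nil => simp [pvMaxLen]
  | cons r rest ih =>
    simp only [pvMaxLen, List.foldl_cons]
    rw [ih (max a r.length), ih (max 0 r.length)]
    omega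

theorem pvMaxLen_cons (r : List String) (rest : List (List String)) :
    pvMaxLen (r :: rest) = max r.length (pvMaxLen rest) := by
  have h := pvMaxLen_foldl rest (max 0 r.length)
  simp only [pvMaxLen, List.foldl_cons] at h ⊢
  omega

theorem pvMaxLen_eq_zero_iff (data : List (List String)) :
    pvMaxLen data = 0 ↔ data.any (fun r => !r.isEmpty) = false := by
  induction data with
  | nil => simp [pvMaxLen]
  | cons r rest ih =>
    rw [pvMaxLen_cons, Nat.max_eq_zero_iff, List.any_cons, Bool.or_eq_false_iff, ih]
    cases r <;> simp

theorem pvMaxLen_map_tail (data : List (List String)) :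
    pvMaxLen (data.map List.tail) = pvMaxLen data - 1 := by
  induction data with
  | nil => simp [pvMaxLen]
  | cons r rest ih =>
    simp only [List.map_cons, pvMaxLen_cons, ih, List.length_tail]
    omega

theorem pvGo_eq_pvTr (m : Nat) (data : List (List String)) (hm : pvMaxLen data = m) :
    pvGo data = pvTr data m := by
  induction m generalizing data with
  | zero =>
    rw [pvGo.eq_def]
    simp [pvTr, (pvMaxLen_eq_zero_iff data).mp hm]
  | succ n ih =>
    have hany : data.any (fun r => !r.isEmpty) = true := by
      by_contra h
      have := (pvMaxLen_eq_zero_iff data).mpr (by simpa using h)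
      omega
    rw [pvGo.eq_def]
    simp only [hany, dif_pos]
    have htail : pvMaxLen (data.map List.tail) = n := by
      rw [pvMaxLen_map_tail, hm]
      omega
    rw [ih _ htail]
    simp only [pvTr, List.range_succ_eq_map, List.map_cons, List.map_map]
    congr 1
    · apply List.map_congr_left; intro r _; cases r <;> rfl
    · apply List.map_congr_left; intro i _
      simp only [Function.comp]
      apply List.map_congr_left; intro r _; cases r <;> simp [List.getD]

theorem pvA_eq_pvTr (data : List (List String)) :
    transpose_2d data = pvTr data (pvMaxLen data) := by
  have hrows : List.foldl (fun rows r => if rows < (r.length : Int) then (r.length : Int) else rows) 0 data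
      = (pvMaxLen data : Int) := by
    have key : ∀ (a : Nat), List.foldl (fun rows r => if rows < (r.length : Int) then (r.length : Int) else rows) ((a : Nat) : Int) data
        = ((List.foldl (fun m r => max m r.length) a data : Nat) : Int) := by
      intro a
      induction data generalizing a with
      | nil => simp
      | cons r rest ih =>
        simp only [List.foldl_cons]
        rw [show (if ((a : Nat) : Int) < (r.length : Int) then (r.length : Int) else ((a : Nat) : Int)) = ((max a r.length : Nat) : Int) by
          push_cast; omega]
        exact ih (max a r.length)
    simpa [pvMaxLen] using key 0
  have hinner : ∀ row : Int,
      List.foldl (fun list2 col => list2 ++ [(PySem.List.pyGet? (PySem.List.pyGetD data col []) row).getD ""]) [] (PySem.List.pyRange 0 (data.length : Int))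
      = data.map (fun r => (PySem.List.pyGet? r row).getD "") := by
    intro row
    rw [PySem.List.foldl_pyRange_zero_pyGetD' data [] (fun l2 r => l2 ++ [(PySem.List.pyGet? r row).getD ""]) []]
    rw [PySem.List.foldl_append_singleton_eq_map]
    simp
  simp only [transpose_2d]
  rw [PySem.List.foldl_pyRange_zero_pyGetD' data [] (fun (rows : Int) (r : List String) => if rows < (r.length : Int) then (r.length : Int) else rows) 0]
  rw [hrows]
  simp only [hinner]
  rw [PySem.List.pyRange_zero_nat, List.foldl_map, PySem.List.foldl_append_singleton_eq_map]
  simp only [List.nil_append, pvTr]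
  apply List.map_congr_left
  intro k _
  apply List.map_congr_left
  intro r _
  rw [PySem.List.pyGet?_natCast, List.getD_eq_getElem?_getD]

-- ===== VERDICT (by name: the statement is the Claim_ definition above) =====
theorem transpose_2d_spec : Claim_equal_transpose_2d := by
  intro data _
  unfold Spec_transpose_2d transpose_2d_alt
  rw [pvA_eq_pvTr, pvGo_eq_pvTr (pvMaxLen data) data rfl]
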